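-- pv_equiv track=rewrite | github.com/rjt2004/fitness-action-eval | fitness_action_eval/baduanjin.py | _debounce_alternating_keys
-- ===== SOURCE A (Python) =====
-- from typing import Any, Dict, List, Mapping, Sequence
--
-- def _debounce_alternating_keys(keys: List[str], left_key: str, right_key: str, min_run: int) -> List[str]:
--     if not keys:
--         return keys
--     out = list(keys)
--     current = next((key for key in keys if key in {left_key, right_key}), None)
--     candidate = None
--     candidate_start = 0
--     candidate_count = 0
--     for idx, key in enumerate(keys):
--         if key not in {left_key, right_key}:
--             out[idx] = key
--             candidate = None
--             candidate_count = 0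
--             continue
--         if current is None:
--             current = key
--         if key == current:
--             out[idx] = current
--             candidate = None
--             candidate_count = 0
--             continue
--         if candidate != key:
--             candidate = key
--             candidate_start = idx
--             candidate_count = 1
--         else:
--             candidate_count += 1
--         if candidate_count >= min_run:
--             current = key
--             for replace_idx in range(candidate_start, idx + 1):
--                 out[replace_idx] = current
--             candidate = None
--             candidate_count = 0
--         else:
--             out[idx] = current
--     return out
-- ===== SOURCE B (Python) =====
-- from typing import List
--
-- def _debounce_alternating_keys(keys: List[str], left_key: str, right_key: str, min_run: int) -> List[str]:
--     targets = {left_key, right_key}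
--     current = next((k for k in keys if k in targets), None)
--     out: List[str] = []
--     i, n = 0, len(keys)
--     while i < n:
--         k = keys[i]
--         if k not in targets:
--             out.append(k)
--             i += 1
--             continue
--         j = i
--         while j < n and keys[j] == k:
--             j += 1
--         run_len = j - i
--         if k != current and run_len >= min_run:
--             current = k
--         out.extend([current] * run_len)
--         i = j
--     return out
-- ===== Notes on version B (the rewrite author's own statement) =====
-- stated objective: simpler
-- what changed: A keeps a per-index candidate counter and back-patches already-written output slots when a run reaches min_run; B instead scans the keys as maximal runs of identical target keys and emits each whole run in one decision (keep, flip, or overwrite with current), so no output slot is ever rewritten.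
import Mathlib
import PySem

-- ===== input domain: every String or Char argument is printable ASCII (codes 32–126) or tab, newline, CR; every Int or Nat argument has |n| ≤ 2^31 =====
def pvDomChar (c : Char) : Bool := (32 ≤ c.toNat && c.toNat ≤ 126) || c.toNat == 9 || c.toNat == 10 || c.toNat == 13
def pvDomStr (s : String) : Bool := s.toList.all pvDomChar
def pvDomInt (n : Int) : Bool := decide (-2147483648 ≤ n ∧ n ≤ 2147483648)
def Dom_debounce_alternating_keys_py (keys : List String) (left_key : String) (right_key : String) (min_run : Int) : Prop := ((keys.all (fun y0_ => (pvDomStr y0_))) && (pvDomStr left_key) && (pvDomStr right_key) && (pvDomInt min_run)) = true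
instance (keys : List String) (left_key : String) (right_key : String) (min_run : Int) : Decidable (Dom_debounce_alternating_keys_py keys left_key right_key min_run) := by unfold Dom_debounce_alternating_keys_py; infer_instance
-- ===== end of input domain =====

-- B replaces A's per-key candidate/back-patch state machine by a run-at-a-time scan
-- that emits each maximal run in one step (objective: simpler).


-- ===== PORT A =====
-- loop body of A: state = (out, current, candidate, candidate_start, candidate_count)
def pyAStep (left_key right_key : String) (min_run : Int)
    (st : List String × Option String × Option String × Int × Int)
    (p : Int × String) : List String × Option String × Option String × Int × Int :=
  let out := st.1
  let current := st.2.1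
  let candidate := st.2.2.1
  let candidate_start := st.2.2.2.1
  let candidate_count := st.2.2.2.2
  let idx := p.1
  let key := p.2
  if ¬ (key == left_key || key == right_key) then
    -- out[idx] = key; candidate = None; candidate_count = 0; continue
    (out.set idx.toNat key, current, none, candidate_start, 0)
  else
    let current := if current = none then some key else current
    if some key = current then
      -- out[idx] = current; candidate = None; candidate_count = 0; continue
      (out.set idx.toNat (current.getD ""), current, none, candidate_start, 0)
    else
      -- candidate bookkeeping
      let cs : Option String × Int × Int :=
        if candidate ≠ some key then (some key, idx, 1)
        else (candidate, candidate_start, candidate_count + 1)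
      if cs.2.2 ≥ min_run then
        -- current = key; back-patch out[candidate_start .. idx]
        ((PySem.List.pyRange cs.2.1 (idx + 1) 1).foldl (fun o ri => o.set ri.toNat key) out,
         some key, none, cs.2.1, 0)
      else
        -- out[idx] = current
        (out.set idx.toNat (current.getD ""), current, cs.1, cs.2.1, cs.2.2)

def debounce_alternating_keys_py (keys : List String) (left_key : String) (right_key : String) (min_run : Int) : List String :=
  if keys = [] then keys
  else
    let current : Option String := keys.find? (fun k => k == left_key || k == right_key)
    ((PySem.List.enumerate keys 0).foldl (pyAStep left_key right_key min_run)
      (keys, current, none, 0, 0)).1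

-- ===== PORT B =====
-- B: consume one maximal run (or one non-target key) per step, emitting it whole.
def pyBRun (left_key right_key : String) (min_run : Int) : List String → Option String → List String
  | [], _ => []
  | k :: rest, current =>
    if ¬ (k == left_key || k == right_key) then
      k :: pyBRun left_key right_key min_run rest current
    else
      let run_len := (rest.takeWhile (fun x => x == k)).length + 1
      let rest' := rest.dropWhile (fun x => x == k)
      let current' := if some k ≠ current ∧ (run_len : Int) ≥ min_run then some k else current
      List.replicate run_len (current'.getD "") ++ pyBRun left_key right_key min_run rest' current'
  termination_by l _ => l.length
  decreasing_by
    · simp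
    · simp only [List.length_cons]
      exact Nat.lt_succ_of_le (List.length_dropWhile_le _ _)

def debounce_alternating_keys_py_alt (keys : List String) (left_key : String) (right_key : String) (min_run : Int) : List String :=
  let current : Option String := keys.find? (fun k => k == left_key || k == right_key)
  pyBRun left_key right_key min_run keys current

-- ===== PRECONDITION & SPEC =====
def Spec_debounce_alternating_keys_py (keys : List String) (left_key : String) (right_key : String) (min_run : Int) (out : List String) : Prop := out = debounce_alternating_keys_py_alt keys left_key right_key min_run
instance (keys : List String) (left_key : String) (right_key : String) (min_run : Int) (out : List String) : Decidable (Spec_debounce_alternating_keys_py keys left_key right_key min_run out) := by unfold Spec_debounce_alternating_keys_py; infer_instance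

-- ===== CLAIM (what is proved, stated in full; the proofs are below) =====
def Claim_equal_debounce_alternating_keys_py : Prop := ∀ (keys : List String) (left_key : String) (right_key : String) (min_run : Int), Dom_debounce_alternating_keys_py keys left_key right_key min_run → Spec_debounce_alternating_keys_py keys left_key right_key min_run (debounce_alternating_keys_py keys left_key right_key min_run)

-- ===== LEMMAS AND PROOFS =====

-- pyBRun consumes the leading run of k's one at a time when current = some k
theorem pyBRun_run (L R : String) (m : Int) (l : List String) (k : String)
    (hT : (k == L || k == R) = true) :
    pyBRun L R m l (some k) =
      List.replicate (l.takeWhile (fun x => x == k)).length k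
        ++ pyBRun L R m (l.dropWhile (fun x => x == k)) (some k) := by
  cases l with
  | nil => simp
  | cons x r =>
    by_cases hx : (x == k) = true
    · have hxk : x = k := eq_of_beq hx
      subst hxk
      rw [pyBRun]
      simp [hT, List.replicate_succ]
    · simp [hx]

theorem pyBRun_cons_eq (L R : String) (m : Int) (r2 : List String) (c : String)
    (hT : (c == L || c == R) = true) :
    pyBRun L R m (c :: r2) (some c) = c :: pyBRun L R m r2 (some c) := by
  rw [pyBRun_run L R m (c :: r2) c hT, pyBRun_run L R m r2 c hT]
  simp [List.replicate_succ]

-- back-patch: folding `set · k` over the range [|pre|, |pre|+w) rewrites the middle block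
theorem backpatch (k : String) (w : Nat) :
    ∀ (pre mid suf : List String), mid.length = w →
    (PySem.List.pyRange (pre.length : Int) ((pre.length + w : Nat) : Int) 1).foldl
        (fun o ri => o.set ri.toNat k) (pre ++ (mid ++ suf))
      = pre ++ (List.replicate w k ++ suf) := by
  induction w with
  | zero =>
    intro pre mid suf hm
    rw [List.length_eq_zero_iff.mp hm]
    rw [PySem.List.pyRange_one_eq_nil (by omega)]
    simp
  | succ w ihw =>
    intro pre mid suf hm
    obtain ⟨v, mid', rfl⟩ : ∃ v mid', mid = v :: mid' := by
      cases mid with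
      | nil => simp at hm
      | cons a b => exact ⟨a, b, rfl⟩
    rw [PySem.List.pyRange_one_cons (by omega)]
    simp only [List.foldl_cons]
    have hset : ((pre ++ (v :: mid' ++ suf)).set ((pre.length : Int)).toNat k)
        = (pre ++ [k]) ++ (mid' ++ suf) := by
      simp
    rw [hset]
    have h2 := ihw (pre ++ [k]) mid' suf (by simpa using hm)
    have harg : ((pre ++ [k]).length : Int) = (pre.length : Int) + 1 := by simp
    rw [harg] at h2
    have harg2 : (((pre ++ [k]).length + w : Nat) : Int) = ((pre.length + (w+1) : Nat) : Int) := by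
      simp; ring
    rw [harg2] at h2
    rw [h2]
    simp [List.replicate_succ]

-- the two mutually-inductive statements tying A's fold to B's run scan
def StmtL1 (L R : String) (m : Int) (l : List String) : Prop :=
  ∀ (i : Nat) (out : List String) (cur : Option String) (cstart : Int),
    out.length = i + l.length →
    (cur = none → ∀ x ∈ l, (x == L || x == R) = false) →
    (∀ c, cur = some c → (c == L || c == R) = true) →
    ((PySem.List.enumerate l (i : Int)).foldl (pyAStep L R m) (out, cur, none, cstart, 0)).1
      = out.take i ++ pyBRun L R m l cur

def StmtL2 (L R : String) (m : Int) (rest : List String) : Prop :=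
  ∀ (pre suf : List String) (c k : String) (cnt : Nat),
    (k == L || k == R) = true → (c == L || c == R) = true → k ≠ c →
    1 ≤ cnt → (cnt : Int) < m → suf.length = rest.length →
    ((PySem.List.enumerate rest ((pre.length + cnt : Nat) : Int)).foldl (pyAStep L R m)
        (pre ++ (List.replicate cnt c ++ suf), some c, some k, (pre.length : Int), (cnt : Int))).1
      = if ((cnt + (rest.takeWhile (fun x => x == k)).length : Nat) : Int) ≥ m
        then pre ++ (List.replicate (cnt + (rest.takeWhile (fun x => x == k)).length) k
              ++ pyBRun L R m (rest.dropWhile (fun x => x == k)) (some k))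
        else pre ++ (List.replicate (cnt + (rest.takeWhile (fun x => x == k)).length) c
              ++ pyBRun L R m (rest.dropWhile (fun x => x == k)) (some c))

-- helper shape lemmas
theorem take_set_succ (l : List String) (i : Nat) (v : String) (h : i < l.length) :
    (l.set i v).take (i+1) = l.take i ++ [v] := by
  rw [List.set_eq_take_cons_drop v h]
  rw [List.take_append]
  simp [List.length_take, Nat.min_eq_left (Nat.le_of_lt h)]

theorem set_mid (pre mid suf : List String) (s0 v : String) :
    (pre ++ (mid ++ s0 :: suf)).set (pre.length + mid.length) v
      = pre ++ (mid ++ (v :: suf)) := by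
  simp

theorem take_pref (a b : List String) (n : Nat) (h : a.length = n) : (a ++ b).take n = a := by
  subst h; exact List.take_left

-- the two targets are the only target keys: a target ≠ k equals c
theorem target_eq (L R x k c : String) (hTx : (x == L || x == R) = true)
    (hTk : (k == L || k == R) = true) (hTc : (c == L || c == R) = true)
    (hkc : k ≠ c) (hxk : x ≠ k) : x = c := by
  simp only [Bool.or_eq_true, beq_iff_eq] at hTx hTk hTc
  rcases hTx with rfl | rfl <;> rcases hTk with rfl | rfl <;> rcases hTc with rfl | rfl <;> tauto

-- unfolding pyAStep, one lemma per branch of A's loop body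
theorem stepA_nt (L R : String) (m : Int) (out : List String) (cur cand : Option String)
    (cs cc i : Int) (k : String) (h : (k == L || k == R) = false) :
    pyAStep L R m (out, cur, cand, cs, cc) (i, k) = (out.set i.toNat k, cur, none, cs, 0) := by
  simp [pyAStep, h]

theorem stepA_keep (L R : String) (m : Int) (out : List String) (cand : Option String)
    (cs cc i : Int) (k : String) (hT : (k == L || k == R) = true) :
    pyAStep L R m (out, some k, cand, cs, cc) (i, k) = (out.set i.toNat k, some k, none, cs, 0) := by
  simp [pyAStep, hT]

theorem stepA_new_ge (L R : String) (m : Int) (out : List String) (cand : Option String)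
    (cs cc i : Int) (k c : String) (hT : (k == L || k == R) = true) (hkc : k ≠ c)
    (hcand : cand ≠ some k) (hm : (1:Int) ≥ m) :
    pyAStep L R m (out, some c, cand, cs, cc) (i, k)
      = (out.set i.toNat k, some k, none, i, 0) := by
  have hr : PySem.List.pyRange i (i+1) 1 = [i] := by
    rw [PySem.List.pyRange_one_cons (by omega), PySem.List.pyRange_one_eq_nil (by omega)]
  simp [pyAStep, hT, hkc, hcand, hm, hr]

theorem stepA_new_lt (L R : String) (m : Int) (out : List String) (cand : Option String)
    (cs cc i : Int) (k c : String) (hT : (k == L || k == R) = true) (hkc : k ≠ c)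
    (hcand : cand ≠ some k) (hm : ¬ (1:Int) ≥ m) :
    pyAStep L R m (out, some c, cand, cs, cc) (i, k)
      = (out.set i.toNat c, some c, some k, i, 1) := by
  simp [pyAStep, hT, hkc, hcand, hm]

theorem stepA_cont_ge (L R : String) (m : Int) (out : List String)
    (cs cc i : Int) (k c : String) (hT : (k == L || k == R) = true) (hkc : k ≠ c)
    (hm : cc + 1 ≥ m) :
    pyAStep L R m (out, some c, some k, cs, cc) (i, k)
      = ((PySem.List.pyRange cs (i + 1) 1).foldl (fun o ri => o.set ri.toNat k) out,
         some k, none, cs, 0) := by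
  simp [pyAStep, hT, hkc, hm]

theorem stepA_cont_lt (L R : String) (m : Int) (out : List String)
    (cs cc i : Int) (k c : String) (hT : (k == L || k == R) = true) (hkc : k ≠ c)
    (hm : ¬ cc + 1 ≥ m) :
    pyAStep L R m (out, some c, some k, cs, cc) (i, k)
      = (out.set i.toNat c, some c, some k, cs, cc + 1) := by
  simp [pyAStep, hT, hkc, hm]

theorem main_induction (L R : String) (m : Int) :
    ∀ (n : Nat) (l : List String), l.length = n → StmtL1 L R m l ∧ StmtL2 L R m l := by
  intro n
  induction n using Nat.strong_induction_on with
  | _ n ih =>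
    intro l hl
    constructor
    · -- StmtL1
      intro i out cur cstart hlen hnone hsome
      cases l with
      | nil =>
        simp only [PySem.List.enumerate_nil, List.foldl_nil]
        rw [pyBRun]
        simp only [List.length_nil, Nat.add_zero] at hlen
        simp [List.take_of_length_le (le_of_eq hlen)]
      | cons k rest =>
        simp only [List.length_cons] at hlen
        have hilt : i < out.length := by omega
        simp only [PySem.List.enumerate_cons, List.foldl_cons]
        have hcast : (i:Int) + 1 = ((i+1 : Nat) : Int) := by push_cast; ring
        by_cases hT : (k == L || k == R) = true
        · cases cur with
          | none =>
            have h := hnone rfl k (by simp)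
            rw [hT] at h; exact absurd h (by simp)
          | some c =>
            have hTc : (c == L || c == R) = true := hsome c rfl
            by_cases hkc : k = c
            · subst hkc
              rw [stepA_keep L R m out none cstart 0 (i:Int) k hT, hcast]
              rw [(ih rest.length (by simp [← hl]) rest rfl).1 (i+1)
                    (out.set (i:Int).toNat k) (some k) cstart
                    (by simp; try omega) (by simp) (fun c' hc' => by cases hc'; exact hT)]
              simp only [Int.toNat_natCast]
              rw [take_set_succ out i k hilt, pyBRun_cons_eq L R m rest k hT]
              simp
            · by_cases hm1 : (1:Int) ≥ m
              · rw [stepA_new_ge L R m out none cstart 0 (i:Int) k c hT hkc (by simp) hm1, hcast]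
                rw [(ih rest.length (by simp [← hl]) rest rfl).1 (i+1)
                      (out.set (i:Int).toNat k) (some k) (i:Int)
                      (by simp; try omega) (by simp) (fun c' hc' => by cases hc'; exact hT)]
                simp only [Int.toNat_natCast]
                rw [take_set_succ out i k hilt, pyBRun_run L R m rest k hT]
                rw [pyBRun]
                have hge : ((rest.takeWhile (fun x => x == k)).length + 1 : Int) ≥ m := by
                  have : (0:Int) ≤ (rest.takeWhile (fun x => x == k)).length := by positivity
                  omega
                simp [hT, hkc, hge, List.replicate_succ]
              · rw [stepA_new_lt L R m out none cstart 0 (i:Int) k c hT hkc (by simp) hm1, hcast]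
                have hset : out.set (i:Int).toNat c
                    = out.take i ++ (List.replicate 1 c ++ out.drop (i+1)) := by
                  simp only [Int.toNat_natCast]
                  rw [List.set_eq_take_cons_drop c hilt]; simp
                have hpl : (out.take i).length = i := by simp; omega
                have hIH2 := (ih rest.length (by simp [← hl]) rest rfl).2
                    (out.take i) (out.drop (i+1)) c k 1 hT hTc hkc (le_refl 1)
                    (by push_cast; omega) (by simp; try omega)
                simp only [Nat.cast_one] at hIH2
                rw [hpl] at hIH2
                rw [hset, hIH2]
                rw [pyBRun]
                by_cases hge : m ≤ ((rest.takeWhile (fun x => x == k)).length : Int) + 1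
                · rw [if_pos (by push_cast; omega)]
                  have hcond := eq_true hge
                  simp [hT, hkc, hcond, List.replicate_succ, Nat.add_comm 1]
                · rw [if_neg (by push_cast; omega)]
                  have hcond := eq_false hge
                  simp [hT, hkc, hcond, List.replicate_succ, Nat.add_comm 1]
        · -- non-target key
          rw [stepA_nt L R m out cur none cstart 0 (i:Int) k (by simpa using hT), hcast]
          rw [(ih rest.length (by simp [← hl]) rest rfl).1 (i+1)
                (out.set (i:Int).toNat k) cur cstart
                (by simp; try omega)
                (fun hc x hx => hnone hc x (List.mem_cons_of_mem _ hx)) hsome]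
          simp only [Int.toNat_natCast]
          rw [take_set_succ out i k hilt]
          rw [pyBRun]
          simp [hT]
    · -- StmtL2
      intro pre suf c k cnt hTk hTc hkc hcnt1 hcntm hsuf
      cases l with
      | nil =>
        simp only [PySem.List.enumerate_nil, List.foldl_nil, List.length_nil] at hsuf ⊢
        rw [List.length_eq_zero_iff.mp hsuf]
        rw [List.takeWhile_nil, List.dropWhile_nil]
        rw [if_neg (by simp; try omega)]
        rw [pyBRun]
        simp
      | cons x r2 =>
        cases suf with
        | nil => simp at hsuf
        | cons s0 suf' =>
        simp only [List.length_cons] at hsuf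
        have hsuf' : suf'.length = r2.length := by omega
        simp only [PySem.List.enumerate_cons, List.foldl_cons]
        have hcast : ((pre.length + cnt : Nat) : Int) + 1 = ((pre.length + cnt + 1 : Nat) : Int) := by
          push_cast; ring
        by_cases hx : (x == k) = true
        · have hxk : x = k := eq_of_beq hx
          subst x
          by_cases hm2 : (cnt : Int) + 1 ≥ m
          · rw [stepA_cont_ge L R m _ (pre.length : Int) (cnt : Int)
                  ((pre.length + cnt : Nat) : Int) k c hTk hkc hm2]
            have hbp := backpatch k (cnt + 1) pre (List.replicate cnt c ++ [s0]) suf' (by simp)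
            have hr : ((pre.length + cnt : Nat) : Int) + 1 = ((pre.length + (cnt+1) : Nat) : Int) := by
              push_cast; ring
            rw [hr]
            have hout : pre ++ (List.replicate cnt c ++ s0 :: suf')
                = pre ++ ((List.replicate cnt c ++ [s0]) ++ suf') := by simp
            rw [hout, hbp]
            rw [(ih r2.length (by simp [← hl]; try omega) r2 rfl).1 (pre.length + (cnt + 1))
                  (pre ++ (List.replicate (cnt+1) k ++ suf')) (some k) (pre.length : Int)
                  (by simp [hsuf']; try omega) (by simp) (fun c' hc' => by cases hc'; exact hTk)]
            have htk : (pre ++ (List.replicate (cnt+1) k ++ suf')).take (pre.length + (cnt + 1))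
                = pre ++ List.replicate (cnt+1) k := by
              rw [show pre ++ (List.replicate (cnt+1) k ++ suf')
                    = (pre ++ List.replicate (cnt+1) k) ++ suf' by simp]
              exact take_pref _ _ _ (by simp)
            rw [htk, pyBRun_run L R m r2 k hTk]
            rw [List.takeWhile_cons_of_pos (by simp), List.dropWhile_cons_of_pos (by simp)]
            simp only [List.length_cons]
            rw [if_pos (by push_cast; omega)]
            rw [show cnt + ((r2.takeWhile (fun x => x == k)).length + 1)
                  = (cnt + 1) + (r2.takeWhile (fun x => x == k)).length by omega]
            simp [List.replicate_add]
          · rw [stepA_cont_lt L R m _ (pre.length : Int) (cnt : Int)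
                  ((pre.length + cnt : Nat) : Int) k c hTk hkc hm2]
            have hset : (pre ++ (List.replicate cnt c ++ s0 :: suf')).set
                  ((pre.length + cnt : Nat) : Int).toNat c
                = pre ++ (List.replicate (cnt+1) c ++ suf') := by
              simp only [Int.toNat_natCast]
              rw [show pre.length + cnt = pre.length + (List.replicate cnt c).length by simp]
              rw [set_mid]
              simp [List.replicate_succ']
            rw [hset, hcast]
            have hIH2 := (ih r2.length (by simp [← hl]; try omega) r2 rfl).2
                pre suf' c k (cnt+1) hTk hTc hkc (by omega) (by push_cast; omega) hsuf'
            rw [show ((cnt:Int) + 1) = ((cnt + 1 : Nat) : Int) by push_cast; ring]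
            rw [show (pre.length + cnt + 1 : Nat) = (pre.length + (cnt + 1) : Nat) by omega]
            rw [hIH2]
            rw [List.takeWhile_cons_of_pos (by simp), List.dropWhile_cons_of_pos (by simp)]
            simp only [List.length_cons]
            rw [show cnt + ((r2.takeWhile (fun x => x == k)).length + 1)
                  = (cnt + 1) + (r2.takeWhile (fun x => x == k)).length by omega]
        · -- run of k ends at x
          have hxk : x ≠ k := fun h => by simp [h] at hx
          have htw : List.takeWhile (fun y => y == k) (x :: r2) = [] :=
            List.takeWhile_cons_of_neg (by simpa using hx)
          have hdw : List.dropWhile (fun y => y == k) (x :: r2) = x :: r2 :=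
            List.dropWhile_cons_of_neg (by simpa using hx)
          rw [htw, hdw]
          rw [if_neg (by simp; try omega)]
          by_cases hTx : (x == L || x == R) = true
          · have hxc : x = c := target_eq L R x k c hTx hTk hTc hkc hxk
            subst hxc
            rw [stepA_keep L R m _ (some k) (pre.length : Int) (cnt : Int)
                  ((pre.length + cnt : Nat) : Int) x hTx]
            have hset : (pre ++ (List.replicate cnt x ++ s0 :: suf')).set
                  ((pre.length + cnt : Nat) : Int).toNat x
                = pre ++ (List.replicate (cnt+1) x ++ suf') := by
              simp only [Int.toNat_natCast]
              rw [show pre.length + cnt = pre.length + (List.replicate cnt x).length by simp]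
              rw [set_mid]
              simp [List.replicate_succ']
            rw [hset, hcast]
            rw [(ih r2.length (by simp [← hl]; try omega) r2 rfl).1 (pre.length + cnt + 1)
                  (pre ++ (List.replicate (cnt+1) x ++ suf')) (some x) (pre.length : Int)
                  (by simp [hsuf']; try omega) (by simp) (fun c' hc' => by cases hc'; exact hTx)]
            have htk : (pre ++ (List.replicate (cnt+1) x ++ suf')).take (pre.length + cnt + 1)
                = pre ++ List.replicate (cnt+1) x := by
              rw [show pre ++ (List.replicate (cnt+1) x ++ suf')
                    = (pre ++ List.replicate (cnt+1) x) ++ suf' by simp]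
              exact take_pref _ _ _ (by simp; try omega)
            rw [htk, pyBRun_cons_eq L R m r2 x hTx]
            simp [List.replicate_succ']
          · rw [stepA_nt L R m _ (some c) (some k) (pre.length : Int) (cnt : Int)
                  ((pre.length + cnt : Nat) : Int) x (by simpa using hTx)]
            have hset : (pre ++ (List.replicate cnt c ++ s0 :: suf')).set
                  ((pre.length + cnt : Nat) : Int).toNat x
                = pre ++ (List.replicate cnt c ++ x :: suf') := by
              simp only [Int.toNat_natCast]
              rw [show pre.length + cnt = pre.length + (List.replicate cnt c).length by simp]
              rw [set_mid]
            rw [hset, hcast]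
            rw [(ih r2.length (by simp [← hl]; try omega) r2 rfl).1 (pre.length + cnt + 1)
                  (pre ++ (List.replicate cnt c ++ x :: suf')) (some c) (pre.length : Int)
                  (by simp [hsuf']; try omega) (by simp) (fun c' hc' => by cases hc'; exact hTc)]
            have htk : (pre ++ (List.replicate cnt c ++ x :: suf')).take (pre.length + cnt + 1)
                = pre ++ (List.replicate cnt c ++ [x]) := by
              rw [show pre ++ (List.replicate cnt c ++ x :: suf')
                    = (pre ++ (List.replicate cnt c ++ [x])) ++ suf' by simp]
              exact take_pref _ _ _ (by simp; try omega)
            rw [htk]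
            rw [pyBRun]
            simp [hTx]

-- ===== VERDICT (by name: the statement is the Claim_ definition above) =====
theorem debounce_alternating_keys_py_spec : Claim_equal_debounce_alternating_keys_py := by
  intro keys L R m _
  unfold Spec_debounce_alternating_keys_py debounce_alternating_keys_py debounce_alternating_keys_py_alt
  by_cases hk : keys = []
  · subst hk; simp [pyBRun]
  · simp only [if_neg hk]
    have h1 := (main_induction L R m keys.length keys rfl).1
    have := h1 0 keys (keys.find? (fun k => k == L || k == R)) 0 (by simp)
      (fun hn => by simpa [List.find?_eq_none] using hn)
      (fun c hc => by simpa using List.find?_some hc)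
    simpa using this
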